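-- pv_equiv track=rewrite | github.com/WCBru/Loose-Scripts | Small Challenges/Advent of Code/2019/10/ab.py | dec_and_remove
-- ===== SOURCE A (Python) =====
-- def dec_and_remove(lst, amount):
--     newDict = {}
--     for key in lst.keys():
--         if lst[key] > amount:
--             newDict[key] = lst[key] - amount
--         elif lst[key] < amount:
--             raise ValueError("Sightline calculation error")
--
--     return newDict
-- ===== SOURCE B (Python) =====
-- def dec_and_remove(lst, amount):
--     def go(items):
--         if not items:
--             return {}
--         (key, value) = items[0]
--         rest = go(items[1:])
--         if value < amount:
--             raise ValueError("Sightline calculation error")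
--         return ({key: value - amount} | rest) if value > amount else rest
--     return go(list(lst.items()))
-- ===== Notes on version B (the rewrite author's own statement) =====
-- stated objective: alternative
-- what changed: A iterates over the dict's keys with an accumulator dict and repeated lst[key] lookups; B recurses on the structure of the item list, building the result back from the recursion (prepending the head's entry to the recursively computed dict for the tail via dict union).
import Mathlib
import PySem

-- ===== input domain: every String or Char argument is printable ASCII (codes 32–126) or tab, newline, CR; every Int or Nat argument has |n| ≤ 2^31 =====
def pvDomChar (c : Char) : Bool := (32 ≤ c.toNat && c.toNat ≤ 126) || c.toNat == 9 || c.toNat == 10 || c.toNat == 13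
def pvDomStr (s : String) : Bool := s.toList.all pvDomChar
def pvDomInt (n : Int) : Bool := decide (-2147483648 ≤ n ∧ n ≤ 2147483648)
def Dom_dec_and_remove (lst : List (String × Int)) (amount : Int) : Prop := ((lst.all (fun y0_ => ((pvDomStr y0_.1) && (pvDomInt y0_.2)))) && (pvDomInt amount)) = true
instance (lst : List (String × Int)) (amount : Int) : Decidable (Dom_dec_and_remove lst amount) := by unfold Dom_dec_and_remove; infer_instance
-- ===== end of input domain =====

-- B replaces A's accumulator loop over the dict's keys by structural recursion on the
-- item list, building the result back from the recursion via dict union (alternative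
-- decomposition, same return value on every input where A returns).

-- ===== PORT A =====
-- lst is a Python dict: the association list is read as PySem.Dict.ofList lst.
def dec_and_remove (lst : List (String × Int)) (amount : Int) : List (String × Int) :=
  let d := PySem.Dict.ofList lst
  (d.keys.foldl (fun nd key =>
      match d.get? key with
      | some v => if v > amount then nd.insert key (v - amount) else nd
        -- 'elif lst[key] < amount: raise ValueError' — excluded by Pre_, so the
        -- v < amount case never inserts here (and never returns in Python)
      | none => nd)  -- unreachable: key comes from d.keys
    PySem.Dict.empty).items

-- ===== PORT B =====
-- go(items): recursion on the item list; '{key: value - amount} | rest' is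
-- PySem.Dict.update of the singleton dict with rest's items (exact for Python's |).
def decGo (amount : Int) : List (String × Int) → PySem.Dict String Int
  | [] => PySem.Dict.empty
  | (key, value) :: tl =>
      let rest := decGo amount tl
      if value < amount then rest  -- 'raise ValueError' — excluded by Pre_
      else if value > amount then (PySem.Dict.empty.insert key (value - amount)).update rest.items
      else rest

def dec_and_remove_alt (lst : List (String × Int)) (amount : Int) : List (String × Int) :=
  (decGo amount (PySem.Dict.ofList lst).items).items

-- ===== PRECONDITION & SPEC =====
-- A raises ValueError exactly when some value of the dict is strictly below amount;
-- Pre_ admits exactly the inputs on which A returns.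
def Pre_dec_and_remove (lst : List (String × Int)) (amount : Int) : Prop :=
  ∀ p ∈ (PySem.Dict.ofList lst).items, amount ≤ p.2
instance (lst : List (String × Int)) (amount : Int) : Decidable (Pre_dec_and_remove lst amount) := by unfold Pre_dec_and_remove; infer_instance

def pvWitness_dec_and_remove : (List (String × Int)) × Int := ([("a", 5), ("b", 2)], 2)

def Spec_dec_and_remove (lst : List (String × Int)) (amount : Int) (out : List (String × Int)) : Prop := out = dec_and_remove_alt lst amount
instance (lst : List (String × Int)) (amount : Int) (out : List (String × Int)) : Decidable (Spec_dec_and_remove lst amount out) := by unfold Spec_dec_and_remove; infer_instance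

-- ===== CLAIM (what is proved, stated in full; the proofs are below) =====
def Claim_equal_dec_and_remove : Prop := ∀ (lst : List (String × Int)) (amount : Int), Dom_dec_and_remove lst amount → Pre_dec_and_remove lst amount → Spec_dec_and_remove lst amount (dec_and_remove lst amount)

-- ===== LEMMAS AND PROOFS =====

-- A's loop over fresh distinct keys, each looking up its own value in d,
-- appends exactly the filtered decremented pairs.
lemma dec_loop_items (amount : Int) (d : PySem.Dict String Int)
    (l : List (String × Int)) (acc : PySem.Dict String Int)
    (hget : ∀ p ∈ l, d.get? p.1 = some p.2)
    (hnd : (l.map Prod.fst).Nodup)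
    (hfresh : ∀ p ∈ l, acc.contains p.1 = false) :
    ((l.map Prod.fst).foldl (fun nd key =>
        match d.get? key with
        | some v => if v > amount then nd.insert key (v - amount) else nd
        | none => nd) acc).items
      = acc.items ++ (l.filter (fun p => amount < p.2)).map (fun p => (p.1, p.2 - amount)) := by
  induction l generalizing acc with
  | nil => simp
  | cons hd t ih =>
    obtain ⟨k, v⟩ := hd
    simp only [List.map_cons, List.foldl_cons]
    rw [hget (k, v) (List.mem_cons_self)]
    dsimp only
    simp only [List.map_cons, List.nodup_cons] at hnd
    have hkacc : acc.contains k = false := hfresh (k, v) List.mem_cons_self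
    have hget' : ∀ p ∈ t, d.get? p.1 = some p.2 :=
      fun p hp => hget p (List.mem_cons_of_mem _ hp)
    by_cases hv : v > amount
    · rw [if_pos hv]
      rw [ih _ hget' hnd.2 (fun p hp => by
            rw [PySem.Dict.contains_insert]
            have hne : p.1 ≠ k := fun h => hnd.1 (h ▸ (List.mem_map_of_mem hp))
            simp [hne, hfresh p (List.mem_cons_of_mem _ hp)])]
      rw [PySem.Dict.items_insert_of_not_contains _ _ hkacc]
      simp [hv]
    · rw [if_neg hv]
      rw [ih _ hget' hnd.2 (fun p hp => hfresh p (List.mem_cons_of_mem _ hp))]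
      have hnv : ¬ (amount < v) := hv
      simp [hnv]

-- B's recursion on a nodup-keyed item list with no value below amount produces
-- exactly the filtered decremented pairs, in order.
lemma decGo_items (amount : Int) (l : List (String × Int))
    (hnd : (l.map Prod.fst).Nodup)
    (hpre : ∀ p ∈ l, amount ≤ p.2) :
    (decGo amount l).items
      = (l.filter (fun p => amount < p.2)).map (fun p => (p.1, p.2 - amount)) := by
  induction l with
  | nil => simp [decGo, PySem.Dict.empty]
  | cons hd tl ih =>
    obtain ⟨k, v⟩ := hd
    simp only [List.map_cons, List.nodup_cons] at hnd
    have hpre' : ∀ p ∈ tl, amount ≤ p.2 := fun p hp => hpre p (List.mem_cons_of_mem _ hp)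
    have hrest := ih hnd.2 hpre'
    have hvle : amount ≤ v := hpre (k, v) List.mem_cons_self
    have hnlt : ¬ (v < amount) := not_lt.mpr hvle
    unfold decGo
    rw [if_neg hnlt]
    by_cases hv : v > amount
    · rw [if_pos hv]
      -- rest's keys come from tl's keys, so k is fresh for the singleton dict
      have hkeys : ∀ p ∈ (decGo amount tl).items, p.1 ∈ tl.map Prod.fst := by
        intro p hp
        rw [hrest] at hp
        obtain ⟨q, hq, hpq⟩ := List.mem_map.mp hp
        have h1 : q ∈ tl := List.mem_of_mem_filter hq
        have : p.1 = q.1 := by rw [← hpq]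
        rw [this]
        exact List.mem_map_of_mem h1
      have hndrest : ((decGo amount tl).items.map Prod.fst).Nodup := by
        rw [hrest]
        have : ((tl.filter (fun p => amount < p.2)).map (fun p => (p.1, p.2 - amount))).map Prod.fst
             = (tl.filter (fun p => amount < p.2)).map Prod.fst := by
          simp [List.map_map, Function.comp]
        rw [this]
        exact ((List.filter_sublist (l := tl)).map Prod.fst).nodup hnd.2
      have hfresh : ∀ p ∈ (decGo amount tl).items,
          (PySem.Dict.empty.insert k (v - amount)).contains p.1 = false := by
        intro p hp
        have hne : p.1 ≠ k := fun h => hnd.1 (h ▸ hkeys p hp)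
        simp [PySem.Dict.contains_insert, hne]
      have := PySem.Dict.items_foldl_insert_fresh ((decGo amount tl).items)
        (k := Prod.fst) (v := Prod.snd) (d := PySem.Dict.empty.insert k (v - amount))
        hfresh hndrest
      rw [PySem.Dict.update, this,
          PySem.Dict.items_insert_of_not_contains _ _ (PySem.Dict.contains_empty k)]
      simp [PySem.Dict.empty, hrest, hv]
    · rw [if_neg hv]
      have hnv : ¬ (amount < v) := hv
      simp [hrest, hnv]

-- ===== VERDICT (by name: the statement is the Claim_ definition above) =====
theorem dec_and_remove_spec : Claim_equal_dec_and_remove := by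
  intro lst amount _ hpre
  unfold Spec_dec_and_remove dec_and_remove dec_and_remove_alt
  dsimp only
  set d := PySem.Dict.ofList lst with hd
  have hnodk : d.keys.Nodup := PySem.Dict.nodup_keys_ofList lst
  have hkeys : d.keys = d.items.map Prod.fst := by
    simp [PySem.Dict.keys]
  have hndm : (d.items.map Prod.fst).Nodup := hkeys ▸ hnodk
  have key := dec_loop_items amount d d.items PySem.Dict.empty
    (fun p hp => PySem.Dict.get?_of_mem_items d (k := p.1) (v := p.2) (by simpa using hp) hnodk)
    hndm
    (fun p _ => PySem.Dict.contains_empty p.1)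
  rw [hkeys, key, decGo_items amount d.items hndm hpre]
  simp [PySem.Dict.empty]
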